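-- pv_equiv track=rewrite | github.com/Symbiomatrix/NP_WordSeeker | main.py | Hexify
-- ===== SOURCE A (Python) =====
-- def Hexify(lval,rcnt = 6,indconvex = False):
--     """Converts L1 to L2 of hex shape.
--
--     Row count refers to first col, which is +1 if convex."""
--     if indconvex:
--         conbase = 0
--     else:
--         conbase = 1
--     conmod = (conbase * 2 - 1)
--
--     colmod = 0
--     vret = []
--     l2 = []
--     for i,_ in enumerate(lval):
--         l2.append(lval[i])
--         if len(l2) >= rcnt + conmod * colmod:
--             # Filled a col, switch to odd / even and append it to L2.
--             colmod = 1 - colmod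
--             vret.append(l2)
--             l2 = []
--     if len(l2) > 0:
--         vret.append(l2)
--         l2 = []
--
--     return vret
-- ===== SOURCE B (Python) =====
-- def Hexify(lval, rcnt=6, indconvex=False):
--     """Chunk lval into columns of alternating length by slicing with a cursor."""
--     conmod = -1 if indconvex else 1
--     vret = []
--     pos = 0
--     colmod = 0
--     n = len(lval)
--     while pos < n:
--         collen = max(1, rcnt + conmod * colmod)
--         vret.append(lval[pos:pos + collen])
--         pos += collen
--         colmod = 1 - colmod
--     return vret
-- ===== Notes on version B (the rewrite author's own statement) =====
-- stated objective: simpler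
-- what changed: B replaces A's element-at-a-time accumulator (appending single elements to l2 and testing a running length against the threshold) with a cursor-and-slice while loop that cuts out each whole column of length max(1, rcnt + conmod*colmod) in one slice per column. (one list slice per column instead of one append + length test per element)
import Mathlib
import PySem

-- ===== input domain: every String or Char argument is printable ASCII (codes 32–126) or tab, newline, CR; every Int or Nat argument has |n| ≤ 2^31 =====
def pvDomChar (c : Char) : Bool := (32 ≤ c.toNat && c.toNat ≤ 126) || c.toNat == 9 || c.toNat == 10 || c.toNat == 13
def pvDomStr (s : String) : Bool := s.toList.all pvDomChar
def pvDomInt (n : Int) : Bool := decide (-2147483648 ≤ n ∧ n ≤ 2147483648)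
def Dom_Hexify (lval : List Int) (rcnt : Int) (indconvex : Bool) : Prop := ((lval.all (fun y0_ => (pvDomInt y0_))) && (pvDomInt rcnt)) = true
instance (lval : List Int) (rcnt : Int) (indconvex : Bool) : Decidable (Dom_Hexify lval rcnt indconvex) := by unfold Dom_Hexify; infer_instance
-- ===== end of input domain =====

-- B replaces A's element-at-a-time column accumulator with a cursor that slices
-- each whole column at once (objective: simpler; same O(n) cost).

-- ===== PORT A =====
-- loop body of A's 'for i,_ in enumerate(lval)'; state = (colmod, vret, l2).
-- lval[i] is ported as pyGetD (exact here: i comes from enumerate, always in range).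
def HexifyStep (lval : List Int) (rcnt conmod : Int)
    (st : Int × List (List Int) × List Int) (p : Int × Int) : Int × List (List Int) × List Int :=
  let l2 := st.2.2 ++ [PySem.List.pyGetD lval p.1 0]
  if (l2.length : Int) ≥ rcnt + conmod * st.1 then
    (1 - st.1, st.2.1 ++ [l2], [])
  else (st.1, st.2.1, l2)

def Hexify (lval : List Int) (rcnt : Int) (indconvex : Bool) : List (List Int) :=
  let conbase : Int := if indconvex then 0 else 1
  let conmod : Int := conbase * 2 - 1
  let st := (PySem.List.enumerate lval 0).foldl (HexifyStep lval rcnt conmod) (0, [], [])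
  if st.2.2.length > 0 then st.2.1 ++ [st.2.2] else st.2.1

-- ===== PORT B =====
-- Source B's while loop: cursor pos, slice one column per iteration.
def HexifyAltLoop (lval : List Int) (rcnt conmod : Int) (pos colmod : Int)
    (vret : List (List Int)) : List (List Int) :=
  if pos < (lval.length : Int) then
    let collen := max 1 (rcnt + conmod * colmod)
    HexifyAltLoop lval rcnt conmod (pos + collen) (1 - colmod)
      (vret ++ [PySem.List.slice lval (some pos) (some (pos + collen))])
  else vret
termination_by ((lval.length : Int) - pos).toNat
decreasing_by
  have h1 : 1 ≤ max 1 (rcnt + conmod * colmod) := le_max_left _ _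
  omega

def Hexify_alt (lval : List Int) (rcnt : Int) (indconvex : Bool) : List (List Int) :=
  let conmod : Int := if indconvex then -1 else 1
  HexifyAltLoop lval rcnt conmod 0 0 []

-- ===== PRECONDITION & SPEC =====
def Spec_Hexify (lval : List Int) (rcnt : Int) (indconvex : Bool) (out : List (List Int)) : Prop := out = Hexify_alt lval rcnt indconvex
instance (lval : List Int) (rcnt : Int) (indconvex : Bool) (out : List (List Int)) : Decidable (Spec_Hexify lval rcnt indconvex out) := by unfold Spec_Hexify; infer_instance

-- ===== CLAIM (what is proved, stated in full; the proofs are below) =====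
def Claim_equal_Hexify : Prop := ∀ (lval : List Int) (rcnt : Int) (indconvex : Bool), Dom_Hexify lval rcnt indconvex → Spec_Hexify lval rcnt indconvex (Hexify lval rcnt indconvex)

-- ===== LEMMAS AND PROOFS =====

-- A's loop body rewritten to consume the element itself (proof helper).
def stepB (rcnt conmod : Int) (st : Int × List (List Int) × List Int) (x : Int) :
    Int × List (List Int) × List Int :=
  let l2 := st.2.2 ++ [x]
  if (l2.length : Int) ≥ rcnt + conmod * st.1 then
    (1 - st.1, st.2.1 ++ [l2], [])
  else (st.1, st.2.1, l2)

-- the common column-chunking recursion both programs compute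
def goChunks (rcnt conmod : Int) : List Int → Int → List (List Int)
  | [], _ => []
  | x :: xs, colmod =>
    let t := (max 1 (rcnt + conmod * colmod)).toNat
    ((x :: xs).take t) :: goChunks rcnt conmod ((x :: xs).drop t) (1 - colmod)
termination_by xs _ => xs.length
decreasing_by
  have h1 : 1 ≤ max 1 (rcnt + conmod * colmod) := le_max_left _ _
  simp only [List.length_drop, List.length_cons]
  omega

theorem goChunks_nil (rcnt conmod colmod : Int) : goChunks rcnt conmod [] colmod = [] := by
  rw [goChunks]

theorem goChunks_cons (rcnt conmod : Int) (xs : List Int) (colmod : Int) (h : xs ≠ []) :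
    goChunks rcnt conmod xs colmod
      = xs.take ((max 1 (rcnt + conmod * colmod)).toNat)
        :: goChunks rcnt conmod (xs.drop ((max 1 (rcnt + conmod * colmod)).toNat)) (1 - colmod) := by
  cases xs with
  | nil => exact absurd rfl h
  | cons x xs => rw [goChunks]

def finalize (st : Int × List (List Int) × List Int) : List (List Int) :=
  if st.2.2.length > 0 then st.2.1 ++ [st.2.2] else st.2.1

-- A's fold over enumerate equals a fold over the plain elements
theorem foldA_eq_foldB (lval : List Int) (rcnt conmod : Int)
    (st : Int × List (List Int) × List Int) :
    (PySem.List.enumerate lval 0).foldl (HexifyStep lval rcnt conmod) st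
      = lval.foldl (stepB rcnt conmod) st := by
  have hcong : (PySem.List.enumerate lval 0).foldl (HexifyStep lval rcnt conmod) st
      = (PySem.List.enumerate lval 0).foldl (fun a p => stepB rcnt conmod a p.2) st := by
    apply PySem.List.foldl_congr_mem
    intro a p hp
    rcases (PySem.List.mem_enumerate_iff _ _ _).1 hp with ⟨k, hk, rfl⟩
    simp [HexifyStep, stepB, PySem.List.pyGetD_natCast, List.getD_eq_getElem?_getD,
      List.getElem?_eq_getElem hk]
  rw [hcong]
  conv_rhs => rw [← PySem.List.map_snd_enumerate lval 0]
  rw [List.foldl_map]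

-- filling one column of A's loop, starting from a partially filled l2
theorem fill_partial (rcnt conmod : Int) (colmod : Int) (xs : List Int) :
    ∀ (l2 : List Int) (acc : List (List Int)),
    (l2.length : Int) < rcnt + conmod * colmod →
    xs.foldl (stepB rcnt conmod) (colmod, acc, l2)
      = if ((xs.length : Int) + l2.length < rcnt + conmod * colmod) then
          (colmod, acc, l2 ++ xs)
        else
          (xs.drop ((rcnt + conmod * colmod - l2.length).toNat)).foldl (stepB rcnt conmod)
            (1 - colmod, acc ++ [l2 ++ xs.take ((rcnt + conmod * colmod - l2.length).toNat)], []) := by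
  induction xs with
  | nil =>
    intro l2 acc h
    simp only [List.foldl_nil, List.length_nil, Int.ofNat_zero]
    rw [if_pos (by omega)]
    simp
  | cons x xs ih =>
    intro l2 acc h
    rw [List.foldl_cons]
    show xs.foldl (stepB rcnt conmod) (stepB rcnt conmod (colmod, acc, l2) x) = _
    by_cases hc : (((l2 ++ [x]).length : Int) ≥ rcnt + conmod * colmod)
    · -- the column is completed by x; T = l2.length + 1
      have hT : rcnt + conmod * colmod = (l2.length : Int) + 1 := by
        simp only [List.length_append, List.length_cons, List.length_nil] at hc; omega
      have hk : (rcnt + conmod * colmod - (l2.length : Int)).toNat = 1 := by omega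
      rw [show stepB rcnt conmod (colmod, acc, l2) x
            = (1 - colmod, acc ++ [l2 ++ [x]], []) by simp only [stepB]; rw [if_pos hc]]
      rw [if_neg (by simp only [List.length_cons]; omega), hk]
      simp
    · -- not yet: recurse with l2 ++ [x]
      have hlt : (((l2 ++ [x]).length : Int)) < rcnt + conmod * colmod := by omega
      rw [show stepB rcnt conmod (colmod, acc, l2) x
            = (colmod, acc, l2 ++ [x]) by simp only [stepB]; rw [if_neg hc]]
      rw [ih (l2 ++ [x]) acc hlt]
      have hlen : ((l2 ++ [x]).length : Int) = (l2.length : Int) + 1 := by simp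
      by_cases hcond : ((x :: xs).length : Int) + l2.length < rcnt + conmod * colmod
      · rw [if_pos (by simp only [List.length_cons] at hcond ⊢; omega),
           if_pos (by simp only [List.length_cons] at hcond ⊢; omega)]
        simp
      · rw [if_neg (by simp only [List.length_cons] at hcond ⊢; omega),
           if_neg (by simp only [List.length_cons] at hcond ⊢; omega)]
        have h2 : 2 ≤ rcnt + conmod * colmod - l2.length := by
          simp only [List.length_append, List.length_cons, List.length_nil] at hlt; omega
        have hk : (rcnt + conmod * colmod - (l2.length : Int)).toNat
            = (rcnt + conmod * colmod - ((l2 ++ [x]).length : Int)).toNat + 1 := by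
          rw [hlen]; omega
        rw [hk]
        simp [List.append_assoc]

theorem main_fill (rcnt conmod : Int) :
    ∀ (n : Nat) (xs : List Int), xs.length = n → ∀ (colmod : Int) (acc : List (List Int)),
    finalize (xs.foldl (stepB rcnt conmod) (colmod, acc, []))
      = acc ++ goChunks rcnt conmod xs colmod := by
  intro n
  induction n using Nat.strong_induction_on with
  | _ n ih =>
    intro xs hlen colmod acc
    cases xs with
    | nil => simp [finalize, goChunks_nil]
    | cons x xs =>
      have hn' : xs.length + 1 = n := by simpa using hlen
      by_cases hT : 0 < rcnt + conmod * colmod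
      · -- threshold positive: the first column has T elements (or all, if fewer)
        have hmax : max 1 (rcnt + conmod * colmod) = rcnt + conmod * colmod := by omega
        have h0 : ((([] : List Int)).length : Int) < rcnt + conmod * colmod := by simp; omega
        rw [fill_partial rcnt conmod colmod (x :: xs) [] acc h0]
        by_cases hcond : (((x :: xs).length : Int)) + (([] : List Int).length : Int)
            < rcnt + conmod * colmod
        · rw [if_pos hcond]
          have hlen2 : ((x :: xs).length : Int) < rcnt + conmod * colmod := by simpa using hcond
          rw [goChunks_cons rcnt conmod (x :: xs) colmod (by simp), hmax]
          have htk : (x :: xs).length ≤ (rcnt + conmod * colmod).toNat := by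
            simp only [List.length_cons] at hlen2 ⊢
            omega
          rw [List.take_of_length_le htk, List.drop_eq_nil_of_le htk, goChunks_nil]
          simp [finalize]
        · rw [if_neg hcond]
          simp only [List.length_nil, Int.ofNat_zero, sub_zero, List.nil_append]
          have hd : ((x :: xs).drop ((rcnt + conmod * colmod).toNat)).length < n := by
            simp only [List.length_drop, List.length_cons]
            omega
          rw [ih _ hd _ rfl (1 - colmod) _]
          rw [goChunks_cons rcnt conmod (x :: xs) colmod (by simp), hmax]
          simp [List.append_assoc]
      · -- threshold ≤ 0: every element completes its own column
        have hmax : (max 1 (rcnt + conmod * colmod)).toNat = 1 := by omega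
        rw [List.foldl_cons]
        rw [show stepB rcnt conmod (colmod, acc, []) x
              = (1 - colmod, acc ++ [[x]], []) by
            simp only [stepB]
            rw [if_pos (by simp; omega)]
            simp]
        rw [ih xs.length (by omega) xs rfl (1 - colmod) (acc ++ [[x]])]
        rw [goChunks_cons rcnt conmod (x :: xs) colmod (by simp), hmax]
        simp

-- B's cursor loop computes the same chunking of the remaining suffix
theorem altLoop_eq (lval : List Int) (rcnt conmod : Int) :
    ∀ (n : Nat) (pos colmod : Int) (vret : List (List Int)), 0 ≤ pos →
    (((lval.length : Int)) - pos).toNat = n →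
    HexifyAltLoop lval rcnt conmod pos colmod vret
      = vret ++ goChunks rcnt conmod (lval.drop pos.toNat) colmod := by
  intro n
  induction n using Nat.strong_induction_on with
  | _ n ih =>
    intro pos colmod vret hpos hn
    rw [HexifyAltLoop]
    by_cases hlt : pos < (lval.length : Int)
    · rw [if_pos hlt]
      have h1 : 1 ≤ max 1 (rcnt + conmod * colmod) := le_max_left _ _
      have hnn : 0 ≤ pos + max 1 (rcnt + conmod * colmod) := by omega
      have hrec := ih ((((lval.length : Int)) - (pos + max 1 (rcnt + conmod * colmod))).toNat)
        (by omega) (pos + max 1 (rcnt + conmod * colmod)) (1 - colmod)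
        (vret ++ [PySem.List.slice lval (some pos) (some (pos + max 1 (rcnt + conmod * colmod)))])
        hnn rfl
      rw [hrec]
      rw [PySem.List.slice_toNat lval hpos hnn]
      have hne : lval.drop pos.toNat ≠ [] := by
        intro hcon
        have := congrArg List.length hcon
        simp only [List.length_drop, List.length_nil] at this
        omega
      rw [goChunks_cons rcnt conmod (lval.drop pos.toNat) colmod hne]
      have ht1 : (pos + max 1 (rcnt + conmod * colmod)).toNat - pos.toNat
          = (max 1 (rcnt + conmod * colmod)).toNat := by omega
      have ht2 : (pos + max 1 (rcnt + conmod * colmod)).toNat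
          = pos.toNat + (max 1 (rcnt + conmod * colmod)).toNat := by omega
      rw [ht1, ht2, ← List.drop_drop]
      simp [List.append_assoc]
    · rw [if_neg hlt]
      have : lval.drop pos.toNat = [] := by
        apply List.drop_eq_nil_of_le
        omega
      rw [this, goChunks_nil]
      simp

theorem hexify_eq_go (lval : List Int) (rcnt : Int) (ind : Bool) :
    Hexify lval rcnt ind = goChunks rcnt (if ind then (-1 : Int) else 1) lval 0 := by
  have key : ∀ c : Int,
      (if (lval.foldl (stepB rcnt c) (0, [], [])).2.2.length > 0 then
        (lval.foldl (stepB rcnt c) (0, [], [])).2.1 ++ [(lval.foldl (stepB rcnt c) (0, [], [])).2.2]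
      else (lval.foldl (stepB rcnt c) (0, [], [])).2.1) = goChunks rcnt c lval 0 := by
    intro c
    have h := main_fill rcnt c lval.length lval rfl 0 []
    unfold finalize at h
    simpa using h
  cases ind
  · simp only [Hexify]
    rw [foldA_eq_foldB]
    rw [show ((if (false = true) then (0 : Int) else 1) * 2 - 1) = 1 from by norm_num]
    rw [show (if (false = true) then (-1 : Int) else 1) = 1 from by norm_num]
    exact key 1
  · simp only [Hexify]
    rw [foldA_eq_foldB]
    rw [show ((if True then (0 : Int) else 1) * 2 - 1) = -1 from by simp]
    rw [show (if True then (-1 : Int) else 1) = -1 from by simp]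
    exact key (-1)

theorem alt_eq_go (lval : List Int) (rcnt : Int) (ind : Bool) :
    Hexify_alt lval rcnt ind = goChunks rcnt (if ind then (-1 : Int) else 1) lval 0 := by
  cases ind
  · simp only [Hexify_alt]
    rw [show (if (false = true) then (-1 : Int) else 1) = 1 from by norm_num]
    rw [altLoop_eq lval rcnt 1 (((lval.length : Int)) - 0).toNat 0 0 [] le_rfl rfl]
    simp
  · simp only [Hexify_alt]
    rw [show (if True then (-1 : Int) else 1) = -1 from by simp]
    rw [altLoop_eq lval rcnt (-1) (((lval.length : Int)) - 0).toNat 0 0 [] le_rfl rfl]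
    simp

-- ===== VERDICT (by name: the statement is the Claim_ definition above) =====
theorem Hexify_spec : Claim_equal_Hexify := by
  intro lval rcnt indconvex _
  unfold Spec_Hexify
  rw [hexify_eq_go, alt_eq_go]
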